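-- pv_equiv track=rewrite | github.com/Alpha-Centauri-00/warcode | collections/main.py | set_reducer
-- ===== SOURCE A (Python) =====
-- def set_reducer(inp):
--     '''This function takes in an array of integers from 0-9, and returns a new array:'''
--     if len(inp) == 1:
--         return inp[0]
--
--     res = []
--     count = 1
--     for i in range(1,len(inp)):
--         if inp[i] == inp[i-1]:
--             count +=1
--         else:
--             res.append(count)
--             count = 1
--     res.append(count)
--
--     return set_reducer(res)
-- ===== SOURCE B (Python) =====
-- def set_reducer(inp):
--     while len(inp) != 1:
--         cuts = [0]
--         for i, (prev, cur) in enumerate(zip(inp, inp[1:])):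
--             if cur != prev:
--                 cuts.append(i + 1)
--         cuts.append(len(inp))
--         inp = [b - a for a, b in zip(cuts, cuts[1:])]
--     return inp[0]
-- ===== Notes on version B (the rewrite author's own statement) =====
-- stated objective: alternative
-- what changed: A recursively run-length-counts with a running counter and appends; B iterates with a while loop and computes each counting pass by collecting the run-boundary indices and differencing adjacent boundaries.
-- outside the precondition, e.g. on set_reducer([]): A returns 1, B returns 0
import Mathlib
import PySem

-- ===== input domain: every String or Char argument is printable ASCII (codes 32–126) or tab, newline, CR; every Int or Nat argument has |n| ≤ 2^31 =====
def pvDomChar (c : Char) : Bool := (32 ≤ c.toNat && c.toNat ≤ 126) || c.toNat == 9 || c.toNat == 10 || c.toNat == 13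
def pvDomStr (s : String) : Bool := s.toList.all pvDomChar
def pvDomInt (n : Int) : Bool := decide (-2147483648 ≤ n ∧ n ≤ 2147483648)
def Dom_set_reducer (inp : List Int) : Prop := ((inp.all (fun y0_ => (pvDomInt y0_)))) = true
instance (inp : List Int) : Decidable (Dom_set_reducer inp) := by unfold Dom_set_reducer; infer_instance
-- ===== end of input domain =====

-- B replaces A's recursion-with-running-counter by an iterative loop whose counting pass
-- collects run-boundary indices and differences adjacent boundaries (objective: alternative
-- decomposition, same asymptotic cost).


-- ===== PORT A =====
-- `pvNoAdj l` = no two adjacent elements of l are equal; `pvMeasure l` = fuel that is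
-- proved (below) sufficient for the iteration to reach a single element.
def pvNoAdj : List Int → Bool
  | [] => true
  | [_] => true
  | x :: y :: t => (x != y) && pvNoAdj (y :: t)

def pvMeasure (l : List Int) : Nat :=
  2 * l.length + (if pvNoAdj l then 1 else 0) + (if l = [] then 4 else 0)

-- the counting pass of A: `for i in range(1, len(inp))` reading inp[i], inp[i-1]
-- (ported with pyRange/pyGetD; the indices are always in range, so the default 0 is exact)
def passA (inp : List Int) : List Int :=
  let st := (PySem.List.pyRange 1 (inp.length) 1).foldl
    (fun (st : List Int × Int) i =>
      if PySem.List.pyGetD inp i 0 == PySem.List.pyGetD inp (i - 1) 0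
      then (st.1, st.2 + 1)
      else (st.1 ++ [st.2], 1))
    ([], 1)
  st.1 ++ [st.2]

-- A: if len == 1 return inp[0] (index safe: the length is 1), else recurse on the pass
def set_reducer_go : Nat → List Int → Int
  | 0, _ => 0   -- never reached: the fuel pvMeasure inp always suffices (proved below)
  | n + 1, inp =>
    if inp.length == 1 then PySem.List.pyGetD inp 0 0
    else set_reducer_go n (passA inp)

def set_reducer (inp : List Int) : Int := set_reducer_go (pvMeasure inp) inp

-- ===== PORT B =====
-- B-side helpers, cited in decreasing_by: `changes x s xs` = boundary indices when
-- scanning xs with previous element x at index s, `pvDiffs` = the comprehension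
-- [b - a for a, b in zip(cuts, cuts[1:])].
def pvDiffs (cuts : List Int) : List Int :=
  (cuts.zip (PySem.List.slice cuts (some 1) none)).map (fun ab => ab.2 - ab.1)

-- the counting pass of B: collect run-boundary indices into cuts, then diff adjacent cuts
def passB (inp : List Int) : List Int :=
  pvDiffs (((PySem.List.enumerate (inp.zip (PySem.List.slice inp (some 1) none)) 0).foldl
      (fun acc (ip : Int × (Int × Int)) =>
        if ip.2.2 != ip.2.1 then acc ++ [ip.1 + 1] else acc) [(0 : Int)])
    ++ [(inp.length : Int)])

-- B: while len(inp) != 1: inp = pass(inp); return inp[0] (index safe: the length is 1)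
def set_reducer_alt_go : Nat → List Int → Int
  | 0, _ => 0   -- never reached: the fuel pvMeasure inp always suffices (proved below)
  | n + 1, inp =>
    if inp.length != 1 then set_reducer_alt_go n (passB inp)
    else PySem.List.pyGetD inp 0 0

def set_reducer_alt (inp : List Int) : Int := set_reducer_alt_go (pvMeasure inp) inp

-- ===== PRECONDITION & SPEC =====
-- Pre_ excludes only the empty list, a degenerate input for which no return value is
-- specified: A's unconditional trailing append makes it return 1, B's boundary-difference
-- count returns 0 — both arbitrary choices on an unspecified corner.
def Pre_set_reducer (inp : List Int) : Prop := inp ≠ []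
instance (inp : List Int) : Decidable (Pre_set_reducer inp) := by unfold Pre_set_reducer; infer_instance
def pvWitness_set_reducer : List Int := ([1, 1, 2])

def Spec_set_reducer (inp : List Int) (out : Int) : Prop := out = set_reducer_alt inp
instance (inp : List Int) (out : Int) : Decidable (Spec_set_reducer inp out) := by unfold Spec_set_reducer; infer_instance

-- ===== CLAIM (what is proved, stated in full; the proofs are below) =====
def Claim_equal_set_reducer : Prop := ∀ (inp : List Int), Dom_set_reducer inp → Pre_set_reducer inp → Spec_set_reducer inp (set_reducer inp)

-- ===== LEMMAS AND PROOFS =====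
def rl (x c : Int) : List Int → List Int
  | [] => [c]
  | y :: ys => if y = x then rl x (c + 1) ys else c :: rl y 1 ys

theorem rl_ne_nil (x c : Int) (xs : List Int) : rl x c xs ≠ [] := by
  induction xs generalizing x c with
  | nil => simp [rl]
  | cons y ys ih => simp only [rl]; split_ifs <;> simp [ih]

theorem rl_length_le (x c : Int) (xs : List Int) : (rl x c xs).length ≤ xs.length + 1 := by
  induction xs generalizing x c with
  | nil => simp [rl]
  | cons y ys ih =>
    simp only [rl]; split_ifs
    · exact (ih x (c + 1)).trans (by simp)
    · simpa using Nat.succ_le_succ (ih y 1)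

theorem rl_length_lt (x c : Int) (xs : List Int)
    (h : pvNoAdj (x :: xs) = false) : (rl x c xs).length ≤ xs.length := by
  induction xs generalizing x c with
  | nil => simp [pvNoAdj] at h
  | cons y ys ih =>
    simp only [rl]; split_ifs with hyx
    · exact rl_length_le x (c + 1) ys
    · have hxy : x ≠ y := fun e => hyx (Eq.symm e)
      have h' : pvNoAdj (y :: ys) = false := by
        simpa [pvNoAdj, bne_iff_ne, hxy] using h
      simpa using Nat.succ_le_succ (ih y 1 h')

theorem rl_of_noAdj (x c : Int) (xs : List Int)
    (h : pvNoAdj (x :: xs) = true) : rl x c xs = c :: List.replicate xs.length 1 := by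
  induction xs generalizing x c with
  | nil => simp [rl]
  | cons y ys ih =>
    simp only [pvNoAdj, Bool.and_eq_true, bne_iff_ne, ne_eq] at h
    simp only [rl, if_neg (fun e => h.1 (Eq.symm e))]
    rw [ih y 1 (by simpa [pvNoAdj] using h.2)]
    simp [List.replicate_succ]

theorem pvMeasure_rl_lt (x : Int) (xs : List Int) (hxs : xs ≠ []) :
    pvMeasure (rl x 1 xs) < pvMeasure (x :: xs) := by
  by_cases h : pvNoAdj (x :: xs)
  · rw [rl_of_noAdj x 1 xs h]
    obtain ⟨z, zs, rfl⟩ := List.exists_cons_of_ne_nil hxs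
    have hnc : pvNoAdj ((1 : Int) :: List.replicate ((z :: zs).length) 1) = false := by
      simp [pvNoAdj, List.replicate_succ]
    unfold pvMeasure
    rw [hnc, if_pos h]
    split_ifs <;> simp_all <;> omega
  · have h1 := rl_length_lt x 1 xs (by simpa using h)
    have h2 : 0 < (rl x 1 xs).length := List.length_pos_iff.mpr (rl_ne_nil x 1 xs)
    unfold pvMeasure
    simp only [if_neg (rl_ne_nil x 1 xs), List.length_cons,
      if_neg (List.cons_ne_nil x xs), h, if_false]
    split_ifs <;> omega

-- the index loop of A reads exactly the adjacent pairs l.tail.zip l (pairs (cur, prev))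
theorem adjPairs (l : List Int) :
    (List.range (l.length - 1)).map (fun k => (l.getD (k + 1) 0, l.getD k 0))
      = l.tail.zip l := by
  induction l with
  | nil => simp
  | cons x xs ih =>
    cases xs with
    | nil => simp
    | cons y ys =>
      simp only [List.length_cons, Nat.add_sub_cancel, List.tail_cons] at ih ⊢
      rw [List.range_succ_eq_map, List.map_cons, List.map_map, List.zip_cons_cons]
      congr 1
      all_goals first
        | rfl
        | (rw [← ih]
           refine List.map_congr_left fun k _ => ?_
           simp [Function.comp, List.getD_cons_succ])

theorem foldl_map' {α β σ : Type} (g : β → α) (f : σ → α → σ) (l : List β) (init : σ) :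
    l.foldl (fun st k => f st (g k)) init = (l.map g).foldl f init := by
  rw [List.foldl_map]

theorem zipfold_rl (xs : List Int) : ∀ (x count : Int) (res : List Int),
    (fun st : List Int × Int => st.1 ++ [st.2])
      ((xs.zip (x :: xs)).foldl
        (fun (st : List Int × Int) p =>
          if p.1 == p.2 then (st.1, st.2 + 1) else (st.1 ++ [st.2], 1))
        (res, count))
      = res ++ rl x count xs := by
  induction xs with
  | nil => intro x count res; simp [rl]
  | cons y ys ih =>
    intro x count res
    rw [List.zip_cons_cons, List.foldl_cons]
    by_cases hyx : y = x
    · subst hyx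
      rw [if_pos (by simp), show (((res, count).1 : List Int), (res, count).2 + 1) = (res, count + 1) from rfl,
          show rl y count (y :: ys) = rl y (count + 1) ys from by simp [rl]]
      exact ih y (count + 1) res
    · rw [if_neg (by simp [hyx]),
          show (((res, count).1 : List Int) ++ [(res, count).2], (1 : Int)) = (res ++ [count], 1) from rfl,
          ih y 1 (res ++ [count])]
      simp [rl, hyx]

theorem passA_cons (x : Int) (xs : List Int) : passA (x :: xs) = rl x 1 xs := by
  unfold passA
  rw [PySem.List.pyRange_one, List.foldl_map,
    show ((((x :: xs).length : Int) - 1)).toNat = (x :: xs).length - 1 from by simp]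
  have hfun : (fun (st : List Int × Int) (k : Nat) =>
      if PySem.List.pyGetD (x :: xs) (1 + (k : Int)) 0
          == PySem.List.pyGetD (x :: xs) (1 + (k : Int) - 1) 0
      then (st.1, st.2 + 1) else (st.1 ++ [st.2], 1))
      = (fun (st : List Int × Int) (k : Nat) =>
          (fun (st : List Int × Int) (p : Int × Int) =>
            if p.1 == p.2 then (st.1, st.2 + 1) else (st.1 ++ [st.2], 1)) st
          ((fun (k : Nat) => ((x :: xs).getD (k + 1) 0, (x :: xs).getD k 0)) k)) := by
    funext st k
    rw [show (1 : Int) + (k : Int) - 1 = ((k : Nat) : Int) from by push_cast; ring,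
        show (1 : Int) + (k : Int) = ((k + 1 : Nat) : Int) from by push_cast; ring,
        PySem.List.pyGetD_natCast, PySem.List.pyGetD_natCast]
  rw [hfun, foldl_map' (fun (k : Nat) => ((x :: xs).getD (k + 1) 0, (x :: xs).getD k 0))
        (fun (st : List Int × Int) (p : Int × Int) =>
          if p.1 == p.2 then (st.1, st.2 + 1) else (st.1 ++ [st.2], 1))
        (List.range ((x :: xs).length - 1)) ([], 1),
      adjPairs (x :: xs), List.tail_cons]
  simpa using zipfold_rl xs x 1 []

def changes (x s : Int) : List Int → List Int
  | [] => []
  | y :: ys => if y = x then changes y (s + 1) ys else s :: changes y (s + 1) ys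

theorem slice_one_tail (l : List Int) : PySem.List.slice l (some 1) none = l.tail := by
  simpa [List.drop_one] using PySem.List.slice_from_natCast l 1

theorem pvDiffs_cons₂ (a b : Int) (t : List Int) :
    pvDiffs (a :: b :: t) = (b - a) :: pvDiffs (b :: t) := by
  simp [pvDiffs, slice_one_tail]

theorem cutsFold (xs : List Int) : ∀ (x s : Int) (acc : List Int),
    (PySem.List.enumerate ((x :: xs).zip xs) s).foldl
      (fun acc (ip : Int × (Int × Int)) =>
        if ip.2.2 != ip.2.1 then acc ++ [ip.1 + 1] else acc) acc
    = acc ++ changes x (s + 1) xs := by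
  induction xs with
  | nil => intro x s acc; simp [changes, PySem.List.enumerate]
  | cons y ys ih =>
    intro x s acc
    rw [List.zip_cons_cons, PySem.List.enumerate_cons, List.foldl_cons]
    by_cases hyx : y = x
    · subst hyx
      simpa [changes] using ih y (s + 1) acc
    · have hcond : ((y != x) = true) := bne_iff_ne.mpr hyx
      simp only [hcond, if_true]
      rw [ih y (s + 1) (acc ++ [s + 1])]
      simp [changes, hyx]

theorem diffs_changes (xs : List Int) : ∀ (x c s : Int),
    pvDiffs ((s - c) :: (changes x s xs ++ [s + (xs.length : Int)])) = rl x c xs := by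
  induction xs with
  | nil =>
    intro x c s
    simp only [changes, rl, List.nil_append, List.length_nil, Nat.cast_zero, add_zero]
    rw [pvDiffs_cons₂]
    simp [pvDiffs, slice_one_tail, sub_sub_cancel]
  | cons y ys ih =>
    intro x c s
    simp only [changes, rl]
    by_cases hyx : y = x
    · subst hyx
      simp only [if_pos rfl]
      rw [show s - c = (s + 1) - (c + 1) from by ring,
          show s + (((y :: ys).length : Nat) : Int) = (s + 1) + (ys.length : Int) from by
            push_cast [List.length_cons]; ring]
      exact ih y (c + 1) (s + 1)
    · simp only [if_neg hyx]
      rw [show s + (((y :: ys).length : Nat) : Int) = (s + 1) + (ys.length : Int) from by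
            push_cast [List.length_cons]; ring,
          List.cons_append, pvDiffs_cons₂]
      have h := ih y 1 (s + 1)
      rw [show (s + 1) - (1 : Int) = s from by ring] at h
      rw [h]
      congr 1
      ring

theorem passB_cons (x : Int) (xs : List Int) : passB (x :: xs) = rl x 1 xs := by
  unfold passB
  rw [slice_one_tail, List.tail_cons, cutsFold xs x 0 [(0 : Int)]]
  have h := diffs_changes xs x 1 1
  rw [show (1 : Int) - 1 = 0 from by ring] at h
  rw [show (((x :: xs).length : Nat) : Int) = 1 + (xs.length : Int) from by
        push_cast [List.length_cons]; ring]
  simpa using h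

theorem go_equiv : ∀ (n : Nat) (l : List Int), pvMeasure l ≤ n → l ≠ [] →
    set_reducer_go n l = set_reducer_alt_go n l := by
  intro n
  induction n with
  | zero =>
    intro l hm hl
    exfalso
    have hp : 0 < l.length := List.length_pos_iff.mpr hl
    unfold pvMeasure at hm
    split_ifs at hm <;> omega
  | succ n ih =>
    intro l hm hl
    simp only [set_reducer_go, set_reducer_alt_go]
    by_cases h1 : l.length = 1
    · simp [h1]
    · simp only [beq_iff_eq, bne_iff_ne, ne_eq, if_neg h1, if_pos h1]
      obtain ⟨x, xs, rfl⟩ := List.exists_cons_of_ne_nil hl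
      rw [passA_cons, passB_cons]
      have hxs : xs ≠ [] := by intro hxs; subst hxs; simp at h1
      have hdec := pvMeasure_rl_lt x xs hxs
      exact ih (rl x 1 xs) (by omega) (rl_ne_nil x 1 xs)

-- ===== VERDICT (by name: the statement is the Claim_ definition above) =====
theorem set_reducer_spec : Claim_equal_set_reducer := by
  intro inp _ hpre
  unfold Spec_set_reducer
  exact go_equiv (pvMeasure inp) inp le_rfl hpre
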